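-- pv_equiv track=rewrite | github.com/amerten/AdventOfCode | 2024/day22/part1.py | step
-- ===== SOURCE A (Python) =====
-- def step(n, nb_steps):
--    for _ in  range(nb_steps):
--       n = n ^ (n * 64)
--       n = n % 16777216
--       n = n ^ (n // 32)
--       n = n % 16777216
--       n = n ^ (n * 2048)
--       n = n % 16777216
--    return n
-- ===== SOURCE B (Python) =====
-- # step is linear over GF(2) on 24-bit states: apply one raw step, then a 24x24
-- # bit-matrix (columns as ints) raised to (nb_steps - 1) by binary exponentiation.
--
-- P = 16777216
--
--
-- def _one(v):
--     v = (v ^ (v * 64)) % P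
--     v = (v ^ (v // 32)) % P
--     return (v ^ (v * 2048)) % P
--
--
-- def _apply(cols, v):
--     r = 0
--     for i in range(24):
--         if (v >> i) & 1:
--             r ^= cols[i]
--     return r
--
--
-- def _compose(a, b):
--     return [_apply(a, c) for c in b]
--
--
-- def step(n, nb_steps):
--     if nb_steps <= 0:
--         return n
--     v = _one(n)
--     k = nb_steps - 1
--     cols = [_one(1 << i) for i in range(24)]
--     acc = [1 << i for i in range(24)]
--     while k:
--         if k & 1:
--             acc = _compose(cols, acc)
--         cols = _compose(cols, cols)
--         k >>= 1
--     return _apply(acc, v)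
-- ===== Notes on version B (the rewrite author's own statement) =====
-- stated objective: faster
-- what changed: The xorshift step is linear over GF(2) on the 24-bit state, so B applies one raw step and then a 24x24 bit-matrix (columns stored as ints) raised to nb_steps-1 by binary exponentiation, instead of iterating the step nb_steps times.
import Mathlib
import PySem

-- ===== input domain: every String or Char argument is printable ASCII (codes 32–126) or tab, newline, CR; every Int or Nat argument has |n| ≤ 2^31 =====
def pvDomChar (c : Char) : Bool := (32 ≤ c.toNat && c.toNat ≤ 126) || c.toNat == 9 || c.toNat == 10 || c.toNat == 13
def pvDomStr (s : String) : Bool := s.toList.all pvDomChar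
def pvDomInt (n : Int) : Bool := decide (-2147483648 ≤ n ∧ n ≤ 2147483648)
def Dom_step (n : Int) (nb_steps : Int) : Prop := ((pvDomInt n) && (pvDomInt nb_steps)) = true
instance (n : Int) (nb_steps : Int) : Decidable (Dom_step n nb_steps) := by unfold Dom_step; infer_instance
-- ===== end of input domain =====

-- B replaces A's nb_steps-long loop by one raw step followed by a 24x24 GF(2)
-- bit-matrix power computed by binary exponentiation (measured faster, asymptotic).


-- ===== PORT A =====
def step (n : Int) (nb_steps : Int) : Int :=
  (PySem.List.pyRange 0 nb_steps 1).foldl (fun n _ =>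
    let n1 := PySem.Int.mod (PySem.Int.bxor n (n * 64)) 16777216
    let n2 := PySem.Int.mod (PySem.Int.bxor n1 (PySem.Int.floordiv n1 32)) 16777216
    PySem.Int.mod (PySem.Int.bxor n2 (n2 * 2048)) 16777216) n

-- ===== PORT B =====
-- _one(v): one raw step of the generator
def bOne (v : Int) : Int :=
  let v1 := PySem.Int.mod (PySem.Int.bxor v (v * 64)) 16777216
  let v2 := PySem.Int.mod (PySem.Int.bxor v1 (PySem.Int.floordiv v1 32)) 16777216
  PySem.Int.mod (PySem.Int.bxor v2 (v2 * 2048)) 16777216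

-- _apply(cols, v): xor of cols[i] over the set bits of v (cols has length 24, so i < 24 is in range)
def bApply (cols : List Int) (v : Int) : Int :=
  (PySem.List.pyRange 0 24 1).foldl
    (fun r i => if PySem.Int.band (v >>> i.toNat) 1 = 1
                then PySem.Int.bxor r (PySem.List.pyGetD cols i 0) else r) 0

-- _compose(a, b)
def bCompose (a b : List Int) : List Int := b.map (fun c => bApply a c)

-- the 'while k:' binary-exponentiation loop, recursion on k (k >>= 1 is k / 2, k & 1 is k % 2 for k ≥ 0)
def bPow (k : Nat) (cols acc : List Int) : List Int :=
  if h : k = 0 then acc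
  else bPow (k / 2) (bCompose cols cols) (if k % 2 = 1 then bCompose cols acc else acc)
termination_by k
decreasing_by exact Nat.div_lt_self (Nat.pos_of_ne_zero h) one_lt_two

def step_alt (n : Int) (nb_steps : Int) : Int :=
  if nb_steps ≤ 0 then n
  else
    let v := bOne n
    let k := (nb_steps - 1).toNat
    let cols := (PySem.List.pyRange 0 24 1).map (fun i => bOne ((1 : Int) <<< i.toNat))
    let acc := (PySem.List.pyRange 0 24 1).map (fun i => (1 : Int) <<< i.toNat)
    bApply (bPow k cols acc) v

-- ===== PRECONDITION & SPEC =====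
def Spec_step (n : Int) (nb_steps : Int) (out : Int) : Prop := out = step_alt n nb_steps
instance (n : Int) (nb_steps : Int) (out : Int) : Decidable (Spec_step n nb_steps out) := by unfold Spec_step; infer_instance

-- ===== CLAIM (what is proved, stated in full; the proofs are below) =====
def Claim_equal_step : Prop := ∀ (n : Int) (nb_steps : Int), Dom_step n nb_steps → Spec_step n nb_steps (step n nb_steps)

-- ===== LEMMAS AND PROOFS =====

-- Nat-level image of one raw step
def natOne (x : Nat) : Nat :=
  let a := (x ^^^ x * 64) % 16777216
  let b := (a ^^^ a / 32) % 16777216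
  (b ^^^ b * 2048) % 16777216

-- a GF(2)-linear map on Nat
def Lin (h : Nat → Nat) : Prop := h 0 = 0 ∧ ∀ a b : Nat, h (a ^^^ b) = h a ^^^ h b

-- columns of the bit matrix of h (proof-side abstraction of the cols/acc lists)
def colsOf (h : Nat → Nat) : List Int :=
  (PySem.List.pyRange 0 24 1).map (fun i => ((h (2 ^ i.toNat) : Nat) : Int))

-- one common stage of natOne: z ↦ (z ^^^ f z) % 2^24
def stage (f : Nat → Nat) (z : Nat) : Nat := (z ^^^ f z) % 16777216

theorem bridgeOne (m : Nat) : bOne (m : Int) = ((natOne m : Nat) : Int) := by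
  simp only [bOne, natOne]
  rw [show ((m : Int) * 64) = ((m * 64 : Nat) : Int) by push_cast; ring, PySem.Int.bxor_natCast]
  rw [show (16777216:Int) = ((16777216:Nat):Int) by norm_num, PySem.Int.mod_natCast]
  rw [show (32:Int) = ((32:Nat):Int) by norm_num, PySem.Int.floordiv_natCast,
    PySem.Int.bxor_natCast, PySem.Int.mod_natCast]
  rw [show ((((m ^^^ m * 64) % 16777216 ^^^ (m ^^^ m * 64) % 16777216 / 32) % 16777216 : Nat) : Int) * 2048
      = ((((m ^^^ m * 64) % 16777216 ^^^ (m ^^^ m * 64) % 16777216 / 32) % 16777216 * 2048 : Nat) : Int) by push_cast; ring]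
  rw [PySem.Int.bxor_natCast, PySem.Int.mod_natCast]

theorem stage_lin (f : Nat → Nat) (hf : ∀ a b : Nat, f (a ^^^ b) = f a ^^^ f b) (x y : Nat) :
    stage f (x ^^^ y) = stage f x ^^^ stage f y := by
  unfold stage
  rw [hf, show (16777216:Nat) = 2^24 by norm_num, ← Nat.xor_mod_two_pow]
  congr 1
  apply Nat.eq_of_testBit_eq; intro i
  simp only [Nat.testBit_xor]
  cases x.testBit i <;> cases y.testBit i <;> cases (f x).testBit i <;> cases (f y).testBit i <;> rfl

theorem mul64_lin (a b : Nat) : (a ^^^ b) * 64 = a * 64 ^^^ b * 64 := by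
  have := @Nat.shiftLeft_xor_distrib 6 a b
  simpa [Nat.shiftLeft_eq] using this

theorem mul2048_lin (a b : Nat) : (a ^^^ b) * 2048 = a * 2048 ^^^ b * 2048 := by
  have := @Nat.shiftLeft_xor_distrib 11 a b
  simpa [Nat.shiftLeft_eq] using this

theorem div32_lin (a b : Nat) : (a ^^^ b) / 32 = a / 32 ^^^ b / 32 := by
  have := @Nat.shiftRight_xor_distrib 5 a b
  simpa [Nat.shiftRight_eq_div_pow] using this

theorem natOne_lin : Lin natOne := by
  refine ⟨rfl, fun a b => ?_⟩
  show stage (· * 2048) (stage (· / 32) (stage (· * 64) (a ^^^ b))) =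
       stage (· * 2048) (stage (· / 32) (stage (· * 64) a)) ^^^
       stage (· * 2048) (stage (· / 32) (stage (· * 64) b))
  rw [stage_lin _ mul64_lin, stage_lin _ div32_lin, stage_lin _ mul2048_lin]

theorem lin_iter (h : Nat → Nat) (hl : Lin h) : ∀ s, Lin (h^[s]) := by
  intro s; induction s with
  | zero => exact ⟨rfl, fun a b => rfl⟩
  | succ s ih =>
    refine ⟨?_, fun a b => ?_⟩
    · rw [Function.iterate_succ_apply', ih.1, hl.1]
    · rw [Function.iterate_succ_apply', Function.iterate_succ_apply',
        Function.iterate_succ_apply', ih.2, hl.2]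

theorem natOne_lt (x : Nat) : natOne x < 16777216 := Nat.mod_lt _ (by norm_num)

theorem bOne_nonneg (v : Int) : 0 ≤ bOne v := PySem.Int.mod_nonneg _ (by norm_num)

theorem bOne_lt (v : Int) : bOne v < 16777216 := PySem.Int.mod_lt _ (by norm_num)

theorem mod_pow_succ_xor (v m : Nat) :
    v % 2 ^ (m + 1) = (v % 2 ^ m) ^^^ (if v.testBit m then 2 ^ m else 0) := by
  apply Nat.eq_of_testBit_eq; intro i
  rcases Nat.lt_trichotomy i m with h|h|h
  · by_cases hb : v.testBit m <;>
      simp [Nat.testBit_mod_two_pow, Nat.testBit_xor, hb,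
        show i < m + 1 by omega, h, show m ≠ i by omega]
  · subst h
    by_cases hb : v.testBit i <;>
      simp [Nat.testBit_mod_two_pow, Nat.testBit_xor, hb,
        show i < i + 1 by omega]
  · by_cases hb : v.testBit m <;>
      simp [Nat.testBit_mod_two_pow, Nat.testBit_xor, hb,
        show ¬ i < m + 1 by omega, show ¬ i < m by omega, show m ≠ i by omega]

theorem bit_cond (v m : Nat) :
    (PySem.Int.band ((v : Int) >>> (m : Int)) 1 = 1) ↔ v.testBit m := by
  have hsr : ((v : Int) >>> (m : Int)) = ((v >>> m : Nat) : Int) := by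
    simp [Int.shiftRight_eq, Int.natCast_shiftRight]
  rw [hsr, show (1:Int) = ((1:Nat):Int) from rfl, PySem.Int.band_natCast]
  rw [Nat.and_one_is_mod, Nat.testBit_eq_decide_div_mod_eq, Nat.shiftRight_eq_div_pow]
  constructor
  · intro hh; exact decide_eq_true (by exact_mod_cast hh)
  · intro hh; exact_mod_cast congrArg (fun b : Nat => (b:Int)) (of_decide_eq_true hh)

theorem bApply_partial (h : Nat → Nat) (hl : Lin h) (v : Nat) :
    ∀ m : Nat, m ≤ 24 →
    (PySem.List.pyRange 0 m 1).foldl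
      (fun r i => if PySem.Int.band ((v:Int) >>> i.toNat) 1 = 1
                  then PySem.Int.bxor r (PySem.List.pyGetD (colsOf h) i 0) else r) 0
      = ((h (v % 2 ^ m) : Nat) : Int) := by
  intro m
  induction m with
  | zero => intro _; simp [PySem.List.pyRange, Nat.mod_one, hl.1]
  | succ m ih =>
    intro hm
    rw [show ((m+1 : Nat) : Int) = (m : Int) + 1 by push_cast; ring,
      PySem.List.pyRange_one_succ_right (by positivity), List.foldl_append,
      ih (by omega)]
    simp only [List.foldl_cons, List.foldl_nil, Int.toNat_natCast]
    rw [mod_pow_succ_xor]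
    by_cases hb : v.testBit m
    · rw [if_pos ((bit_cond v m).mpr hb), if_pos hb]
      rw [show PySem.List.pyGetD (colsOf h) (m:Int) 0 = ((h (2 ^ m) : Nat) : Int) by
        unfold colsOf
        rw [show ((24:Int)) = ((24:Nat):Int) from rfl]
        rw [PySem.List.pyGetD_map_pyRange _ 24 m 0 (by omega)]
        simp]
      rw [PySem.Int.bxor_natCast, ← hl.2]
    · rw [if_neg (fun hc => hb ((bit_cond v m).mp hc)), if_neg hb]
      simp

theorem reconstruct (h : Nat → Nat) (hl : Lin h) (v : Nat) (hv : v < 2 ^ 24) :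
    bApply (colsOf h) (v : Int) = ((h v : Nat) : Int) := by
  have h24 : ((24:Nat):Int) = (24:Int) := rfl
  have hv' : v < 16777216 := lt_of_lt_of_eq hv (by norm_num)
  simpa [bApply, Nat.mod_eq_of_lt hv', h24] using bApply_partial h hl v 24 (by omega)

theorem compose_colsOf (h1 h2 : Nat → Nat) (hl : Lin h1)
    (hb : ∀ i : Nat, i < 24 → h2 (2 ^ i) < 2 ^ 24) :
    bCompose (colsOf h1) (colsOf h2) = colsOf (fun x => h1 (h2 x)) := by
  unfold bCompose colsOf
  rw [List.map_map]
  apply List.map_congr_left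
  intro i hi
  have hmem := (PySem.List.mem_pyRange_one).mp hi
  simp only [Function.comp_apply]
  exact reconstruct h1 hl (h2 (2 ^ i.toNat)) (hb i.toNat (by omega))

theorem iter_basis_lt (s i : Nat) (hi : i < 24) : natOne^[s] (2 ^ i) < 2 ^ 24 := by
  cases s with
  | zero => simpa using Nat.pow_lt_pow_right (by norm_num) hi
  | succ s => rw [Function.iterate_succ_apply']; exact natOne_lt _

theorem compose_iter (x y : Nat) :
    bCompose (colsOf (natOne^[x])) (colsOf (natOne^[y])) = colsOf (natOne^[x + y]) := by
  rw [compose_colsOf _ _ (lin_iter _ natOne_lin x) (fun i hi => iter_basis_lt y i hi)]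
  rw [Function.iterate_add]
  rfl

theorem bPow_colsOf (k : Nat) : ∀ a m : Nat,
    bPow k (colsOf (natOne^[a])) (colsOf (natOne^[m])) = colsOf (natOne^[m + a * k]) := by
  induction k using Nat.strong_induction_on with
  | _ k ih =>
    intro a m
    rw [bPow]
    by_cases h0 : k = 0
    · subst h0; simp
    · rw [dif_neg h0]
      by_cases hk : k % 2 = 1
      · obtain ⟨q, hq⟩ : ∃ q, k = 2 * q + 1 := ⟨k / 2, by omega⟩
        rw [if_pos hk, compose_iter, compose_iter,
          ih (k/2) (Nat.div_lt_self (Nat.pos_of_ne_zero h0) one_lt_two),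
          show k / 2 = q by omega, show (a + m) + (a + a) * q = m + a * k by rw [hq]; ring]
      · obtain ⟨q, hq⟩ : ∃ q, k = 2 * q := ⟨k / 2, by omega⟩
        rw [if_neg hk, compose_iter,
          ih (k/2) (Nat.div_lt_self (Nat.pos_of_ne_zero h0) one_lt_two),
          show k / 2 = q by omega, show m + (a + a) * q = m + a * k by rw [hq]; ring]

theorem foldl_const_iterate {α β : Type} (f : α → α) (l : List β) (a : α) :
    l.foldl (fun s _ => f s) a = f^[l.length] a := by
  induction l generalizing a with
  | nil => rfl
  | cons x xs ih => simp [List.foldl_cons, ih, Function.iterate_succ_apply]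

theorem step_iter (n : Int) (nb_steps : Int) :
    step n nb_steps = bOne^[nb_steps.toNat] n := by
  show (PySem.List.pyRange 0 nb_steps 1).foldl (fun s _ => bOne s) n = _
  rw [foldl_const_iterate, PySem.List.length_pyRange_one]
  norm_num

theorem iter_nat (s : Nat) (m : Nat) : bOne^[s] (m : Int) = ((natOne^[s] m : Nat) : Int) := by
  induction s generalizing m with
  | zero => rfl
  | succ s ih => rw [Function.iterate_succ_apply, Function.iterate_succ_apply, bridgeOne, ih]

theorem cols_init :
    (PySem.List.pyRange 0 24 1).map (fun i => bOne ((1 : Int) <<< i.toNat)) = colsOf (natOne^[1]) := by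
  unfold colsOf
  apply List.map_congr_left
  intro i _
  rw [Int.one_shiftLeft i.toNat, bridgeOne, Function.iterate_one]

theorem acc_init :
    (PySem.List.pyRange 0 24 1).map (fun i => (1 : Int) <<< i.toNat) = colsOf (natOne^[0]) := by
  unfold colsOf
  apply List.map_congr_left
  intro i _
  simp only [Function.iterate_zero, id]
  exact Int.one_shiftLeft i.toNat

-- ===== VERDICT (by name: the statement is the Claim_ definition above) =====
theorem step_spec : Claim_equal_step := by
  intro n nb_steps _
  unfold Spec_step step_alt
  by_cases hle : nb_steps ≤ 0
  · rw [if_pos hle, step_iter, show nb_steps.toNat = 0 by omega]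
    rfl
  · rw [if_neg hle]
    simp only [cols_init, acc_init, bPow_colsOf]
    have hvn : bOne n = (((bOne n).toNat : Nat) : Int) := (Int.toNat_of_nonneg (bOne_nonneg n)).symm
    have hvlt : (bOne n).toNat < 2 ^ 24 := by have := bOne_lt n; omega
    rw [hvn, reconstruct _ (lin_iter _ natOne_lin _) _ hvlt]
    rw [step_iter, show nb_steps.toNat = (nb_steps - 1).toNat + 1 by omega,
      Function.iterate_succ_apply, hvn, iter_nat]
    rw [show 0 + 1 * (nb_steps - 1).toNat = (nb_steps - 1).toNat by omega]
    simp
    rw [max_eq_left (bOne_nonneg n)]
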